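-- pv_equiv track=rewrite | github.com/pnkmem433/pnk_kdh | tasmota/Tasmota/lib/libesp32/berry/berry_port/be_solidifylib.py | toidentifier_length
-- ===== SOURCE A (Python) =====
-- def toidentifier_length(s):
--     """Compute the length of the identifier-encoded version of string s.
--     Returns the length including the null terminator (matching C behavior).
--     Operates on raw bytes to match C behavior.
--     """
--     # Convert to raw bytes using latin-1 (transparent byte mapping used
--     # internally by the Python port to represent C byte strings)
--     if isinstance(s, str):
--         s = s.encode('latin-1')
--     length = 1  # for null terminator
--     i = 0
--     while i < len(s):
--         if i + 1 < len(s) and s[i] == ord('_') and s[i + 1] == ord('X'):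
--             length += 3  # _X -> _X_
--             i += 2
--         elif (chr(s[i]).isalnum() if s[i] < 128 else False) or s[i] == ord('_'):
--             i += 1
--             length += 1
--         else:  # escape
--             i += 1
--             length += 4  # _XHH
--     return length
-- ===== SOURCE B (Python) =====
-- def toidentifier_length(s):
--     """Length of the identifier-encoded version of s (incl. null terminator).
--
--     One flat per-byte pass plus one substring count: each '_X' pair costs one
--     extra byte beyond the 1+1 the per-byte sum already charged.
--     """
--     if isinstance(s, str):
--         s = s.encode('latin-1')
--     total = 1  # null terminator
--     for b in s:
--         total += 1 if (b < 128 and chr(b).isalnum()) or b == ord('_') else 4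
--     return total + s.count(b'_X')
-- ===== Notes on version B (the rewrite author's own statement) =====
-- stated objective: simpler
-- what changed: Replaced A's stateful index loop with lookahead and variable-step skipping by one flat per-character sum plus a single non-overlapping substring count of the underscore-X pair (each pair costs 1 extra byte beyond the 1+1 the per-character sum charges); the flat pass plus built-in count is also measurably faster by a constant factor.
import Mathlib
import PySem

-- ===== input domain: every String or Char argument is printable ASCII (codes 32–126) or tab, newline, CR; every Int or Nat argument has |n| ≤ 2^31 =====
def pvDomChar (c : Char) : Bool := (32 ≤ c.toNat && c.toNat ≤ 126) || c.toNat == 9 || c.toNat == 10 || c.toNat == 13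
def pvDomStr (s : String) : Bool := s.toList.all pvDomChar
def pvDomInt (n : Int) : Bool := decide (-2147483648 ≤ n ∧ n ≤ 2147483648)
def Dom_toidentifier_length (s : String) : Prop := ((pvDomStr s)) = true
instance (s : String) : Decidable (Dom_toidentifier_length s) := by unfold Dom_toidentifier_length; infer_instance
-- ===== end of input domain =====

-- B replaces A's stateful lookahead/skip loop by one flat per-character pass plus one
-- non-overlapping count of the substring "_X" (objective: simpler decomposition).

-- ===== PORT A =====
-- A's while loop with the '_X' lookahead, as the obvious structural recursion:
-- the first pattern is A's 'i+1 < len and s[i]=="_" and s[i+1]=="X"' branch (consumes 2),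
-- the second covers A's isalnum-or-underscore branch and the escape branch (consume 1).
def pvLoopA : List Char → Int
  | '_' :: 'X' :: rest => 3 + pvLoopA rest
  | c :: rest =>
      (if (c.toNat < 128 && PySem.Chars.isalnum c) || c == '_' then (1 : Int) else 4)
        + pvLoopA rest
  | [] => 0

def toidentifier_length (s : String) : Int := 1 + pvLoopA s.toList

-- ===== PORT B =====
def toidentifier_length_alt (s : String) : Int :=
  1 + (s.toList.map (fun c =>
        if (c.toNat < 128 && PySem.Chars.isalnum c) || c == '_' then (1 : Int) else 4)).sum
    + (PySem.Str.count s "_X" : Int)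

-- ===== PRECONDITION & SPEC =====
def Spec_toidentifier_length (s : String) (out : Int) : Prop := out = toidentifier_length_alt s
instance (s : String) (out : Int) : Decidable (Spec_toidentifier_length s out) := by unfold Spec_toidentifier_length; infer_instance

-- ===== CLAIM (what is proved, stated in full; the proofs are below) =====
def Claim_equal_toidentifier_length : Prop := ∀ (s : String), Dom_toidentifier_length s → Spec_toidentifier_length s (toidentifier_length s)

-- ===== LEMMAS AND PROOFS =====

-- the greedy non-overlapping count of "_X", as a structural recursion
def pvCntUX : List Char → Nat
  | '_' :: 'X' :: rest => pvCntUX rest + 1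
  | _ :: rest => pvCntUX rest
  | [] => 0

theorem pvCntUX_cons (c : Char) (t : List Char)
    (h : ∀ u, c = '_' → t = 'X' :: u → False) : pvCntUX (c :: t) = pvCntUX t := by
  rw [pvCntUX.eq_def]
  split
  · rename_i rest heq
    injection heq with h1 h2
    exact absurd (h rest h1 h2) (by simp)
  · rename_i c' rest' _ heq
    injection heq with h1 h2; subst h1; subst h2; rfl
  · rename_i heq; exact absurd heq (by simp)

theorem pvLoopA_cons (c : Char) (t : List Char)
    (h : ∀ u, c = '_' → t = 'X' :: u → False) :
    pvLoopA (c :: t)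
      = (if (c.toNat < 128 && PySem.Chars.isalnum c) || c == '_' then (1 : Int) else 4)
        + pvLoopA t := by
  rw [pvLoopA.eq_def]
  split
  · rename_i rest heq
    injection heq with h1 h2
    exact absurd (h rest h1 h2) (by simp)
  · rename_i c' rest' _ heq
    injection heq with h1 h2; subst h1; subst h2; rfl
  · rename_i heq; exact absurd heq (by simp)

theorem pvCount_go_eq (fuel : Nat) (l : List Char) (acc : Nat) (h : l.length ≤ fuel) :
    PySem.Chars.count.go ['_', 'X'] fuel l acc = acc + pvCntUX l := by
  induction fuel generalizing l acc with
  | zero =>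
      have : l = [] := List.length_eq_zero_iff.mp (Nat.le_zero.mp h)
      subst this; simp [PySem.Chars.count.go, pvCntUX]
  | succ n ih =>
      match l with
      | [] => simp [PySem.Chars.count.go, pvCntUX]
      | c :: t =>
          by_cases hp : List.isPrefixOf ['_', 'X'] (c :: t) = true
          · obtain ⟨u, hu⟩ : ∃ u, c :: t = '_' :: 'X' :: u := by
              cases t with
              | nil => simp [List.isPrefixOf] at hp
              | cons d u =>
                  simp [List.isPrefixOf] at hp
                  exact ⟨u, by rw [← hp.1, ← hp.2]⟩
            rw [hu] at hp ⊢
            rw [show PySem.Chars.count.go ['_', 'X'] (n+1) ('_' :: 'X' :: u) acc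
                  = PySem.Chars.count.go ['_', 'X'] n u (acc + 1) by
                  simp [PySem.Chars.count.go, hp]]
            have hlen : u.length ≤ n := by
              have h' := h; rw [hu] at h'; simp at h'; omega
            rw [ih u (acc + 1) hlen]
            rw [show pvCntUX ('_' :: 'X' :: u) = pvCntUX u + 1 from rfl]
            omega
          · rw [show PySem.Chars.count.go ['_', 'X'] (n+1) (c :: t) acc
                  = PySem.Chars.count.go ['_', 'X'] n t acc by
                  simp [PySem.Chars.count.go, hp]]
            have hlen : t.length ≤ n := by simp at h; omega
            rw [ih t acc hlen]
            rw [pvCntUX_cons c t]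
            intro u hc ht
            subst hc; subst ht
            simp [List.isPrefixOf] at hp

theorem pvCount_eq_cnt (cs : List Char) :
    PySem.Chars.count cs ['_', 'X'] = pvCntUX cs := by
  have := pvCount_go_eq cs.length cs 0 (le_refl _)
  simpa [PySem.Chars.count] using this

theorem pvLoopA_eq (cs : List Char) :
    pvLoopA cs = (cs.map (fun c =>
        if (c.toNat < 128 && PySem.Chars.isalnum c) || c == '_' then (1 : Int) else 4)).sum
      + (pvCntUX cs : Int) := by
  induction cs using pvCntUX.induct with
  | case1 rest ih =>
      rw [show pvLoopA ('_' :: 'X' :: rest) = 3 + pvLoopA rest from rfl, ih]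
      rw [show pvCntUX ('_' :: 'X' :: rest) = pvCntUX rest + 1 from rfl]
      have h1 : (if (('_' : Char).toNat < 128 && PySem.Chars.isalnum '_') || ('_' : Char) == '_'
          then (1 : Int) else 4) = 1 := by decide
      have h2 : (if (('X' : Char).toNat < 128 && PySem.Chars.isalnum 'X') || ('X' : Char) == '_'
          then (1 : Int) else 4) = 1 := by decide
      simp only [List.map_cons, List.sum_cons, h1, h2]
      push_cast
      ring
  | case2 c rest h ih =>
      rw [pvLoopA_cons c rest h, ih, pvCntUX_cons c rest h]
      simp only [List.map_cons, List.sum_cons]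
      ring
  | case3 => simp [pvLoopA, pvCntUX]

-- ===== VERDICT (by name: the statement is the Claim_ definition above) =====
theorem toidentifier_length_spec : Claim_equal_toidentifier_length := by
  intro s _
  unfold Spec_toidentifier_length toidentifier_length toidentifier_length_alt
  rw [pvLoopA_eq]
  rw [show PySem.Str.count s "_X" = PySem.Chars.count s.toList ['_', 'X'] by
    simp [PySem.Str.count_eq]]
  rw [pvCount_eq_cnt]
  ring
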